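-- pv_equiv track=rewrite | github.com/al-osokin/rueo_global | backend/app/parsing/parser_v3/normalization.py | _replace_tilde_with_strategy
-- ===== SOURCE A (Python) =====
-- from typing import Any, Dict, Iterable, List, Optional, Tuple
--
-- def _replace_tilde_with_strategy(text: str, lemma: str, base: str) -> str:
--     if not text:
--         return text
--     builder: List[str] = []
--     length = len(text)
--     i = 0
--     while i < length:
--         char = text[i]
--         if char == '~':
--             next_char = text[i + 1] if i + 1 < length else ''
--             use_base = bool(next_char and (next_char.isalpha() or next_char in "'"))
--             replacement = base if use_base else lemma
--             builder.append(replacement)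
--             i += 1
--             continue
--         builder.append(char)
--         i += 1
--     return ''.join(builder)
-- ===== SOURCE B (Python) =====
-- def _replace_tilde_with_strategy(text: str, lemma: str, base: str) -> str:
--     if not text:
--         return text
--     parts = text.split('~')
--     pieces = [parts[0]]
--     for p in parts[1:]:
--         pieces.append(base if p and (p[0].isalpha() or p[0] == "'") else lemma)
--         pieces.append(p)
--     return ''.join(pieces)
-- ===== Notes on version B (the rewrite author's own statement) =====
-- stated objective: idiomatic
-- what changed: Replaces the manual index-by-index while loop with a look-at-text[i+1] peek by splitting the text on '~' once and interleaving each segment with a replacement chosen from the segment's first character.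
import Mathlib
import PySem

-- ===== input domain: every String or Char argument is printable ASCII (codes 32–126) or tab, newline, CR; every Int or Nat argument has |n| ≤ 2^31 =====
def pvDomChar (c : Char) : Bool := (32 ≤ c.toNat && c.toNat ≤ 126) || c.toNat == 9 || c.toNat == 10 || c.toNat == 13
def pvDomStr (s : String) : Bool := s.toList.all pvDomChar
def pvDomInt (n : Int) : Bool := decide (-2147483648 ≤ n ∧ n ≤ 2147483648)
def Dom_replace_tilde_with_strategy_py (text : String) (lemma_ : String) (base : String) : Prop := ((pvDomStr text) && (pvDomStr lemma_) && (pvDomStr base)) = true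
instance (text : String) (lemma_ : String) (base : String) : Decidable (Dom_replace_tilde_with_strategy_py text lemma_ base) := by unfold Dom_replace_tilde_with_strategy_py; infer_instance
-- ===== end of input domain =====

-- ===== PORT A =====
-- B replaces A's index-by-index scan with a single split on '~' plus interleave (idiomatic, same cost).

-- A: `use_base = bool(next_char and (next_char.isalpha() or next_char in "'"))` (next_char = '' when past the end)
def pvAuseBase (next : Option Char) : Bool :=
  match next with
  | none => false
  | some nc => PySem.Chars.isalpha nc || nc == '\''

-- A's while loop over i: char = text[i]; on '~' append base/lemma (peeking text[i+1]), else append char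
def pvAloop (lemma_ base : String) : List Char → List String
  | [] => []
  | c :: rest =>
    if c == '~' then
      (if pvAuseBase rest.head? then base else lemma_) :: pvAloop lemma_ base rest
    else
      String.ofList [c] :: pvAloop lemma_ base rest

def replace_tilde_with_strategy_py (text : String) (lemma_ : String) (base : String) : String :=
  if text == "" then text
  else PySem.Str.join "" (pvAloop lemma_ base text.toList)

-- ===== PORT B =====
-- B: `base if p and (p[0].isalpha() or p[0] == "'") else lemma` for a split segment p
def pvBrep (lemma_ base : String) (p : List Char) : List Char :=
  match p with
  | [] => lemma_.toList
  | nc :: _ => if PySem.Chars.isalpha nc || nc == '\'' then base.toList else lemma_.toList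

-- B: split on '~' (Python str.split with a one-char separator = List.splitOn on the char list),
-- then parts[0] followed by replacement+segment for each later segment.
def replace_tilde_with_strategy_py_alt (text : String) (lemma_ : String) (base : String) : String :=
  if text == "" then text
  else
    match text.toList.splitOn '~' with
    | [] => ""
    | h :: t => String.ofList (h ++ (t.map (fun p => pvBrep lemma_ base p ++ p)).flatten)

-- ===== PRECONDITION & SPEC =====
def Spec_replace_tilde_with_strategy_py (text : String) (lemma_ : String) (base : String) (out : String) : Prop := out = replace_tilde_with_strategy_py_alt text lemma_ base
instance (text : String) (lemma_ : String) (base : String) (out : String) : Decidable (Spec_replace_tilde_with_strategy_py text lemma_ base out) := by unfold Spec_replace_tilde_with_strategy_py; infer_instance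

-- ===== CLAIM (what is proved, stated in full; the proofs are below) =====
def Claim_equal_replace_tilde_with_strategy_py : Prop := ∀ (text : String) (lemma_ : String) (base : String), Dom_replace_tilde_with_strategy_py text lemma_ base → Spec_replace_tilde_with_strategy_py text lemma_ base (replace_tilde_with_strategy_py text lemma_ base)

-- ===== LEMMAS AND PROOFS =====

theorem pv_join_nil_eq_flatten (L : List (List Char)) : PySem.Chars.join [] L = L.flatten := by
  induction L with
  | nil => simp [PySem.Chars.join_nil]
  | cons p rest ih =>
    cases rest with
    | nil => simp [PySem.Chars.join_singleton]
    | cons q r =>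
      rw [PySem.Chars.join_cons_cons]
      simp [ih]

-- on a tilde, A's peek at the next character chooses the same replacement as B's look at the
-- first character of the following split segment
theorem pv_splitOn_nil : ([] : List Char).splitOn '~' = [[]] := rfl

theorem pv_splitOn_cons (c : Char) (r : List Char) :
    (c :: r).splitOn '~' = if c == '~' then [] :: r.splitOn '~' else (r.splitOn '~').modifyHead (List.cons c) := by
  simp [List.splitOn, List.splitOnP_cons]

-- on a tilde, A's peek at the next character chooses the same replacement as B's look at the
-- first character of the following split segment
theorem pv_rep_agree (lemma_ base : String) (rest : List Char) (h' : List Char) (t' : List (List Char))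
    (hs : rest.splitOn '~' = h' :: t') :
    (if pvAuseBase rest.head? then base else lemma_).toList = pvBrep lemma_ base h' := by
  cases rest with
  | nil =>
    rw [pv_splitOn_nil] at hs
    injection hs with h1 h2
    subst h1
    simp [pvAuseBase, pvBrep]
  | cons d r =>
    by_cases hd : d = '~'
    · subst hd
      rw [pv_splitOn_cons] at hs
      simp at hs
      obtain ⟨h1, h2⟩ := hs
      subst h1
      have hub : pvAuseBase (some '~') = false := by decide
      simp [hub, pvBrep]
    · rw [pv_splitOn_cons] at hs
      simp [hd] at hs
      rcases hr : r.splitOn '~' with _ | ⟨h'', t''⟩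
      · exact absurd hr (List.splitOnP_ne_nil _ _)
      · rw [hr] at hs
        simp at hs
        obtain ⟨h1, h2⟩ := hs
        subst h1
        simp [pvAuseBase, pvBrep]
        split <;> rfl

theorem pv_main (lemma_ base : String) (l : List Char) (h : List Char) (t : List (List Char))
    (hs : l.splitOn '~' = h :: t) :
    ((pvAloop lemma_ base l).map String.toList).flatten
      = h ++ (t.map (fun p => pvBrep lemma_ base p ++ p)).flatten := by
  induction l generalizing h t with
  | nil =>
    rw [pv_splitOn_nil] at hs
    injection hs with h1 h2
    subst h1
    subst h2
    simp [pvAloop]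
  | cons c rest ih =>
    rcases hr : rest.splitOn '~' with _ | ⟨h', t'⟩
    · exact absurd hr (List.splitOnP_ne_nil _ _)
    by_cases hc : c = '~'
    · subst hc
      rw [pv_splitOn_cons] at hs
      simp [hr] at hs
      obtain ⟨h1, h2⟩ := hs
      subst h1
      subst h2
      simp [pvAloop, ih h' t' hr, pv_rep_agree lemma_ base rest h' t' hr]
    · rw [pv_splitOn_cons] at hs
      simp [hc, hr] at hs
      obtain ⟨h1, h2⟩ := hs
      subst h2
      rw [← h1]
      simp [pvAloop, hc, ih h' t' hr]

-- ===== VERDICT (by name: the statement is the Claim_ definition above) =====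
theorem replace_tilde_with_strategy_py_spec : Claim_equal_replace_tilde_with_strategy_py := by
  unfold Claim_equal_replace_tilde_with_strategy_py
  intro text lemma_ base _
  unfold Spec_replace_tilde_with_strategy_py
  unfold replace_tilde_with_strategy_py replace_tilde_with_strategy_py_alt
  by_cases ht : text == ""
  · simp [ht]
  · simp only [ht]
    rcases hs : text.toList.splitOn '~' with _ | ⟨h, t⟩
    · exact absurd hs (List.splitOnP_ne_nil _ _)
    · apply String.toList_injective
      simp [PySem.Str.toList_join, pv_join_nil_eq_flatten, pv_main lemma_ base text.toList h t hs]
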